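-- pv_equiv track=rewrite | github.com/appnet-org/compiler | compiler/main.py | replace_state
-- ===== SOURCE A (Python) =====
-- def replace_state(lst, state_name):
--     strong_found = False
--     for i in range(len(lst)):
--         if "strong" in lst[i]:
--             if strong_found:
--                 lst[i] = lst[i].replace(state_name, "")
--             else:
--                 strong_found = True
--     return lst
-- ===== SOURCE B (Python) =====
-- def replace_state(lst, state_name):
--     lst[:] = [x.replace(state_name, "")
--               if "strong" in x and any("strong" in y for y in lst[:i])
--               else x
--               for i, x in enumerate(lst)]
--     return lst
-- ===== Notes on version B (the rewrite author's own statement) =====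
-- stated objective: alternative
-- what changed: Drops the mutable strong_found flag and the in-place per-index updates: each element is rewritten by a stateless per-element criterion ('contains strong and some earlier element contains strong', tested with any over the prefix lst[:i]), and the whole list is rebuilt in one comprehension assigned back via lst[:].
import Mathlib
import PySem

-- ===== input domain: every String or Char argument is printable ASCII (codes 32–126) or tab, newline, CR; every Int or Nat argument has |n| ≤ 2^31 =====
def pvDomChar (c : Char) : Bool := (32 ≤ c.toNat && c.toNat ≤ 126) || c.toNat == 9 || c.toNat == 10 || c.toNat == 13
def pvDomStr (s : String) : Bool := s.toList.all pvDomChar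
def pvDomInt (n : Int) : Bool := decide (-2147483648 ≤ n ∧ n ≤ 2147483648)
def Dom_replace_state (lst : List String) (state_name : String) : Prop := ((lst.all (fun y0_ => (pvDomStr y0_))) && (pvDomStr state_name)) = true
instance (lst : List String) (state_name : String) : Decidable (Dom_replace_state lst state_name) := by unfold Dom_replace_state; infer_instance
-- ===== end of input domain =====

-- B drops A's mutable strong_found flag and in-place updates: each element is rewritten by the
-- stateless criterion "contains 'strong' and some earlier element contains 'strong'" (any over the
-- prefix lst[:i]) and the list is rebuilt in one comprehension (objective: alternative).
-- A mutates lst in place; B performs the equivalent in-place 'lst[:] =' assignment, so the returned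
-- object and the mutation coincide; the theorems below are about the return value.

-- ===== PORT A =====
def replace_state (lst : List String) (state_name : String) : List String :=
  ((PySem.List.pyRange 0 lst.length 1).foldl
    (fun (st : List String × Bool) i =>
      let l := st.1
      let strong_found := st.2
      if PySem.Str.isIn "strong" (PySem.List.pyGetD l i "") then
        if strong_found then
          (PySem.List.pySetD l i
            (PySem.Str.replace (PySem.List.pyGetD l i "") state_name ""), strong_found)
        else (l, true)
      else st)
    (lst, false)).1

-- ===== PORT B =====
def replace_state_alt (lst : List String) (state_name : String) : List String :=
  (PySem.List.enumerate lst).map (fun p =>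
    if PySem.Str.isIn "strong" p.2 &&
        (PySem.List.slice lst none (some p.1)).any (fun y => PySem.Str.isIn "strong" y)
    then PySem.Str.replace p.2 state_name ""
    else p.2)

-- ===== PRECONDITION & SPEC =====
def Spec_replace_state (lst : List String) (state_name : String) (out : List String) : Prop := out = replace_state_alt lst state_name
instance (lst : List String) (state_name : String) (out : List String) : Decidable (Spec_replace_state lst state_name out) := by unfold Spec_replace_state; infer_instance

-- ===== CLAIM =====
def Claim_equal_replace_state : Prop := ∀ (lst : List String) (state_name : String), Dom_replace_state lst state_name → Spec_replace_state lst state_name (replace_state lst state_name)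

-- ===== LEMMAS AND PROOFS =====

-- reference recursion: A's indexed loop reduces to this (abstract test p and rewriter f)
def goRS (p : String → Bool) (f : String → String) : List String → Bool → List String
  | [], _ => []
  | s :: rest, b =>
    if p s then (if b then f s else s) :: goRS p f rest true
    else s :: goRS p f rest b

theorem A_loop (p : String → Bool) (f : String → String) (l pre : List String) (b : Bool) :
    ((PySem.List.pyRange (pre.length : Int) ((pre.length : Int) + l.length) 1).foldl
      (fun (st : List String × Bool) i =>
        if p (PySem.List.pyGetD st.1 i "") then
          if st.2 then (PySem.List.pySetD st.1 i (f (PySem.List.pyGetD st.1 i "")), st.2)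
          else (st.1, true)
        else st)
      (pre ++ l, b)).1 = pre ++ goRS p f l b := by
  induction l generalizing pre b with
  | nil =>
      rw [show ((pre.length : Int) + ([] : List String).length) = (pre.length : Int) by simp,
        PySem.List.pyRange_one_eq_nil (le_refl _)]
      simp [goRS]
  | cons s rest ih =>
      rw [PySem.List.pyRange_one_cons (by simp)]
      rw [List.foldl_cons]
      have hget : PySem.List.pyGetD (pre ++ s :: rest) (pre.length : Int) "" = s := by
        rw [PySem.List.pyGetD_natCast]
        simp [List.getD]
      have hset : ∀ v : String,
          PySem.List.pySetD (pre ++ s :: rest) (pre.length : Int) v = pre ++ v :: rest := by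
        intro v
        rw [PySem.List.pySetD_natCast]
        simp
      have step : ∀ (s' : String) (b' : Bool),
          ((PySem.List.pyRange ((pre.length : Int) + 1)
              ((pre.length : Int) + ((s :: rest).length : Int)) 1).foldl
            (fun (st : List String × Bool) i =>
              if p (PySem.List.pyGetD st.1 i "") then
                if st.2 then (PySem.List.pySetD st.1 i (f (PySem.List.pyGetD st.1 i "")), st.2)
                else (st.1, true)
              else st)
            (pre ++ s' :: rest, b')).1 = pre ++ s' :: goRS p f rest b' := by
        intro s' b'
        have h := ih (pre ++ [s']) b'
        simp only [List.append_assoc, List.singleton_append, List.length_append,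
          List.length_cons, List.length_nil, Nat.cast_add, Nat.cast_one,
          zero_add] at h ⊢
        rw [show ((pre.length : Int) + 1 + (rest.length : Int)) =
            ((pre.length : Int) + ((rest.length : Int) + 1)) by ring] at h
        exact h
      simp only [hget]
      by_cases hp : p s = true
      · cases b with
        | true =>
            simp only [goRS, hp, if_true]
            rw [hset (f s)]
            exact step (f s) true
        | false =>
            simp only [goRS, hp, if_true, Bool.false_eq_true, if_false]
            exact step s true
      · simp only [goRS, hp]
        exact step s b

theorem A_eq_go (lst : List String) (sn : String) :
    replace_state lst sn =
      goRS (fun x => PySem.Str.isIn "strong" x) (fun x => PySem.Str.replace x sn "") lst false := by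
  have h := A_loop (fun x => PySem.Str.isIn "strong" x) (fun x => PySem.Str.replace x sn "")
    lst [] false
  simpa [replace_state] using h

-- B's stateless per-element criterion equals the flag recursion: the flag at position i is
-- exactly "some element of the prefix satisfies p".
theorem go_eq_map (p : String → Bool) (f : String → String) :
    ∀ (pre l : List String) (b : Bool), b = pre.any p →
      goRS p f l b =
        (PySem.List.enumerate l (pre.length : Int)).map (fun q =>
          if p q.2 && (PySem.List.slice (pre ++ l) none (some q.1)).any p then f q.2 else q.2) := by
  intro pre l
  induction l generalizing pre with
  | nil => intro b _; simp [goRS, PySem.List.enumerate]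
  | cons s rest ih =>
      intro b hb
      rw [PySem.List.enumerate_cons, List.map_cons]
      have hslice : PySem.List.slice (pre ++ s :: rest) none (some (pre.length : Int)) = pre := by
        rw [PySem.List.slice_to_natCast]; simp
      have hhead :
          (if p s && (PySem.List.slice (pre ++ s :: rest) none (some (pre.length : Int))).any p
            then f s else s) = (if p s then (if b then f s else s) else s) := by
        rw [hslice, ← hb]
        by_cases hp : p s = true <;> cases b <;> simp [hp]
      have htail := ih (pre ++ [s]) (b || p s) (by rw [hb]; simp [List.any_append])
      have hcast : ((pre ++ [s]).length : Int) = (pre.length : Int) + 1 := by simp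
      rw [hcast, List.append_assoc, List.singleton_append] at htail
      by_cases hp : p s = true
      · have hb2 : (b || p s) = true := by simp [hp]
        rw [hb2] at htail
        simp only [goRS]
        rw [if_pos hp]
        exact congrArg₂ List.cons (by rw [hhead]; simp [hp]) htail
      · have hb2 : (b || p s) = b := by simp [hp]
        rw [hb2] at htail
        simp only [goRS]
        rw [if_neg hp]
        exact congrArg₂ List.cons (by rw [hhead]; simp [hp]) htail

-- ===== VERDICT =====
theorem replace_state_spec : Claim_equal_replace_state := by
  intro lst sn _
  unfold Spec_replace_state replace_state_alt
  rw [A_eq_go]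
  have h := go_eq_map (fun x => PySem.Str.isIn "strong" x) (fun x => PySem.Str.replace x sn "")
    [] lst false rfl
  simpa using h
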